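-- pv_equiv track=rewrite | github.com/Milo-91/ToT-creative-writing | tot_text.py | check
-- ===== SOURCE A (Python) =====
-- def check(text, input_data):##examine if last sentence is matched input
--     fragment_1 = text.replace(', ', '. ')
--     fragments_1 = fragment_1.split('. ')
--
--     for i in range(len(fragments_1)):
--         fragments_1[i] = fragments_1[i].strip()
--
--     if fragments_1[-1] in input_data:
--         return True
--     else:
--         return False
-- ===== SOURCE B (Python) =====
-- def check(text, input_data):
--     replaced = text.replace(', ', '. ')
--     idx = replaced.rfind('. ')
--     last = replaced if idx == -1 else replaced[idx + 2:]
--     return last.strip() in input_data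
-- ===== Notes on version B (the rewrite author's own statement) =====
-- stated objective: simpler
-- what changed: Instead of building the full fragment list (replace, split on '. ', strip every fragment, index [-1]), B extracts only the needed last fragment right-to-left: rfind the last '. ' in the replaced text, take the suffix (or the whole string if absent), strip it once, and test membership.
import Mathlib
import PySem

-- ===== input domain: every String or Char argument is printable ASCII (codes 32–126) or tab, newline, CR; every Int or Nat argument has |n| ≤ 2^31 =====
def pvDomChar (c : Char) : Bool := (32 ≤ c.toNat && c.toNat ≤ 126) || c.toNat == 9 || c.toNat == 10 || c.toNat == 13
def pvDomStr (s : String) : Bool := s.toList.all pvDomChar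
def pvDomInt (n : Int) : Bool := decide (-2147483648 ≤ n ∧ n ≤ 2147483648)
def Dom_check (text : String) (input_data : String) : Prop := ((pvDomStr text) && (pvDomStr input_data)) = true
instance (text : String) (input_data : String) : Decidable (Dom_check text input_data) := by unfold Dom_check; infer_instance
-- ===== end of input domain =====

-- B extracts only the last fragment via rfind instead of building and stripping the whole
-- fragment list; same return value, proved equal (objective: simpler).


-- ===== PORT A =====
def check (text : String) (input_data : String) : Bool :=
  let fragment_1 := PySem.Str.replace text ", " ". "
  let fragments_1 := (PySem.Str.split? fragment_1 ". ").getD []   -- sep ≠ "", so split? is always some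
  let fragments_1 := fragments_1.map PySem.Str.strip              -- the for-loop stripping each fragment in place
  match PySem.List.pyGet? fragments_1 (-1) with                   -- fragments_1[-1]; split gives a nonempty list, so never none
  | some last => PySem.Str.isIn last input_data
  | none => false

-- ===== PORT B =====
def check_alt (text : String) (input_data : String) : Bool :=
  let replaced := PySem.Str.replace text ", " ". "
  let idx := PySem.Str.rfind replaced ". "
  let last := if idx == -1 then replaced else PySem.Str.slice replaced (some (idx + 2)) none
  PySem.Str.isIn (PySem.Str.strip last) input_data

-- ===== PRECONDITION & SPEC =====
def Spec_check (text : String) (input_data : String) (out : Bool) : Prop := out = check_alt text input_data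
instance (text : String) (input_data : String) (out : Bool) : Decidable (Spec_check text input_data out) := by unfold Spec_check; infer_instance

-- ===== CLAIM (what is proved, stated in full; the proofs are below) =====
def Claim_equal_check : Prop := ∀ (text : String) (input_data : String), Dom_check text input_data → Spec_check text input_data (check text input_data)

-- ===== LEMMAS AND PROOFS =====

-- rfind.go only returns -1 or a nonnegative index
lemma rfind_go_neg_or_nonneg (s sub : List Char) :
    ∀ j, PySem.Chars.rfind.go s sub j = -1 ∨ 0 ≤ PySem.Chars.rfind.go s sub j := by
  intro j
  induction j with
  | zero => simp only [PySem.Chars.rfind.go]; split_ifs <;> simp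
  | succ j ih =>
    simp only [PySem.Chars.rfind.go]
    split_ifs
    · right; omega
    · exact ih

-- peel one character off the front of the string being rfind-scanned
lemma rfind_go_cons (c : Char) (rest sub : List Char) :
    ∀ j, PySem.Chars.rfind.go (c :: rest) sub (j + 1) =
      if PySem.Chars.rfind.go rest sub j = -1 then PySem.Chars.rfind.go (c :: rest) sub 0
      else PySem.Chars.rfind.go rest sub j + 1 := by
  intro j
  induction j with
  | zero =>
    simp only [PySem.Chars.rfind.go, List.drop_succ_cons, List.drop_zero]
    split_ifs <;> simp_all
  | succ j ih =>
    have h2 : PySem.Chars.rfind.go (c :: rest) sub (j + 2) =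
        if sub.isPrefixOf (List.drop (j + 1) rest) then ((j + 2 : Nat) : Int)
        else PySem.Chars.rfind.go (c :: rest) sub (j + 1) := by
      simp only [PySem.Chars.rfind.go, List.drop_succ_cons]
    have h3 : PySem.Chars.rfind.go rest sub (j + 1) =
        if sub.isPrefixOf (List.drop (j + 1) rest) then ((j + 1 : Nat) : Int)
        else PySem.Chars.rfind.go rest sub j := by
      simp only [PySem.Chars.rfind.go]
    rw [h2, h3]
    by_cases h : sub.isPrefixOf (List.drop (j + 1) rest)
    · have hne : ((j + 1 : Nat) : Int) ≠ -1 := by omega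
      rw [if_pos h, if_pos h, if_neg hne]
      push_cast; ring
    · rw [if_neg h, if_neg h]
      exact ih

lemma rfind_cons (c : Char) (rest sub : List Char) :
    PySem.Chars.rfind (c :: rest) sub =
      if PySem.Chars.rfind rest sub = -1 then (if sub.isPrefixOf (c :: rest) then 0 else -1)
      else PySem.Chars.rfind rest sub + 1 := by
  show PySem.Chars.rfind.go (c :: rest) sub (rest.length + 1) = _
  rw [rfind_go_cons c rest sub rest.length]
  have h0 : PySem.Chars.rfind.go (c :: rest) sub 0 =
      if sub.isPrefixOf (c :: rest) then 0 else -1 := by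
    simp [PySem.Chars.rfind.go]
  rw [h0]; rfl

lemma rfind_nonneg_of_ne (s sub : List Char) (h : PySem.Chars.rfind s sub ≠ -1) :
    0 ≤ PySem.Chars.rfind s sub := by
  rcases rfind_go_neg_or_nonneg s sub s.length with h' | h'
  · exact absurd h' h
  · exact h'

-- the last piece splitOn.go produces, in terms of rfind on what remains to scan
lemma splitOn_go_last (fuel : Nat) :
    ∀ (l cur : List Char) (accs : List (List Char)), l.length < fuel →
      (PySem.Chars.splitOn.go ['.', ' '] fuel l cur accs).getLast? =
        some (if PySem.Chars.rfind l ['.', ' '] = -1 then cur.reverse ++ l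
              else l.drop ((PySem.Chars.rfind l ['.', ' ']).toNat + 2)) := by
  induction fuel with
  | zero => intro l cur accs h; omega
  | succ fuel ih =>
    intro l cur accs h
    match l with
    | [] =>
      simp only [PySem.Chars.splitOn.go, List.reverse_cons, List.getLast?_concat]
      have : PySem.Chars.rfind ([] : List Char) ['.', ' '] = -1 := by decide
      simp [this]
    | c :: rest =>
      by_cases hp : List.isPrefixOf ['.', ' '] (c :: rest)
      · -- hp forces c = '.' and rest = ' ' :: rest2
        obtain ⟨rest2, hc, hd⟩ : ∃ rest2, c = '.' ∧ rest = ' ' :: rest2 := by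
          cases rest with
          | nil => simp [List.isPrefixOf] at hp
          | cons d rest2 =>
            simp [List.isPrefixOf] at hp
            exact ⟨rest2, hp.1.symm, by rw [← hp.2]⟩
        subst hc; subst hd
        have hgo : PySem.Chars.splitOn.go ['.', ' '] (fuel + 1) ('.' :: ' ' :: rest2) cur accs =
            PySem.Chars.splitOn.go ['.', ' '] fuel rest2 [] (cur.reverse :: accs) := by
          simp [PySem.Chars.splitOn.go, List.isPrefixOf]
        rw [hgo, ih rest2 [] (cur.reverse :: accs) (by simp at h ⊢; omega)]
        rw [rfind_cons, rfind_cons]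
        by_cases hr : PySem.Chars.rfind rest2 ['.', ' '] = -1
        · have h1 : List.isPrefixOf ['.', ' '] (' ' :: rest2) = false := by
            simp [List.isPrefixOf]
          simp [hr, List.isPrefixOf]
        · have hnn := rfind_nonneg_of_ne rest2 _ hr
          have h1 : PySem.Chars.rfind rest2 ['.', ' '] + 1 ≠ -1 := by omega
          have h2 : PySem.Chars.rfind rest2 ['.', ' '] + 1 + 1 ≠ -1 := by omega
          simp only [hr, h1, h2, ite_false]
          have h3 : (PySem.Chars.rfind rest2 ['.', ' '] + 1 + 1).toNat + 2 =
              (PySem.Chars.rfind rest2 ['.', ' ']).toNat + 2 + 1 + 1 := by omega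
          rw [h3]
          simp [List.drop_succ_cons]
      · have hgo : PySem.Chars.splitOn.go ['.', ' '] (fuel + 1) (c :: rest) cur accs =
            PySem.Chars.splitOn.go ['.', ' '] fuel rest (c :: cur) accs := by
          simp only [PySem.Chars.splitOn.go]
          rw [if_neg (by simpa using hp)]
        rw [hgo, ih rest (c :: cur) accs (by simp at h ⊢; omega)]
        rw [rfind_cons]
        by_cases hr : PySem.Chars.rfind rest ['.', ' '] = -1
        · simp [hr, hp]
        · have hnn := rfind_nonneg_of_ne rest _ hr
          have h1 : PySem.Chars.rfind rest ['.', ' '] + 1 ≠ -1 := by omega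
          simp only [hr, h1, ite_false]
          have h3 : (PySem.Chars.rfind rest ['.', ' '] + 1).toNat + 2 =
              (PySem.Chars.rfind rest ['.', ' ']).toNat + 2 + 1 := by omega
          rw [h3]
          simp [List.drop_succ_cons]

lemma splitOn_last (s : List Char) :
    (PySem.Chars.splitOn s ['.', ' ']).getLast? =
      some (if PySem.Chars.rfind s ['.', ' '] = -1 then s
            else s.drop ((PySem.Chars.rfind s ['.', ' ']).toNat + 2)) := by
  have := splitOn_go_last (s.length + 1) s [] [] (by omega)
  simpa [PySem.Chars.splitOn] using this

-- xs[-1] is getLast?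
lemma pyGet?_neg_one {α : Type} (xs : List α) : PySem.List.pyGet? xs (-1) = xs.getLast? := by
  cases xs with
  | nil => rfl
  | cons x t =>
    simp [PySem.List.pyGet?, PySem.List.pyIdx?, List.getLast?_eq_getElem?]

-- ===== VERDICT (by name: the statement is the Claim_ definition above) =====

theorem check_spec : Claim_equal_check := by
  intro text input_data _
  unfold Spec_check check check_alt
  have hsep : (". " : String).toList = ['.', ' '] := by decide
  set r := PySem.Str.replace text ", " ". " with hr
  have hsplit : PySem.Str.split? r ". " =
      some ((PySem.Chars.splitOn r.toList ['.', ' ']).map String.ofList) := by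
    simp [PySem.Str.split?, PySem.Chars.split?, hsep]
  simp only [hsplit, Option.getD_some, pyGet?_neg_one, List.getLast?_map, splitOn_last,
    Option.map_some, PySem.Str.rfind_eq, hsep]
  by_cases hneg : PySem.Chars.rfind r.toList ['.', ' '] = -1
  · have hb : (PySem.Chars.rfind r.toList ['.', ' '] == -1) = true := by simp [hneg]
    simp [hneg, PySem.Str.isIn, PySem.Str.strip, String.toList_ofList]
  · have hb : (PySem.Chars.rfind r.toList ['.', ' '] == -1) = false := by simp [hneg]
    have hnn := rfind_nonneg_of_ne r.toList _ hneg
    have hslice : (PySem.Str.slice r (some (PySem.Chars.rfind r.toList ['.', ' '] + 2)) none).toList =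
        r.toList.drop ((PySem.Chars.rfind r.toList ['.', ' ']).toNat + 2) := by
      rw [PySem.Str.toList_slice]
      simp only [PySem.Chars.slice_eq_listSlice]
      have hT : (PySem.Chars.rfind r.toList ['.', ' '] + 2).toNat =
          (PySem.Chars.rfind r.toList ['.', ' ']).toNat + 2 := by omega
      rw [PySem.List.slice_from _ (show (0:Int) ≤ PySem.Chars.rfind r.toList ['.', ' '] + 2 by omega), hT]
    simp only [hneg, if_false, hb, Bool.false_eq_true]
    simp [PySem.Str.isIn, PySem.Str.strip, String.toList_ofList, hslice]
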